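-- pv_equiv track=rewrite | github.com/ArcherWoo/meeting-assistant | backend/routers/chat.py | _estimate_context_window
-- ===== SOURCE A (Python) =====
-- def _estimate_context_window(model: str) -> int:
--     """按常见模型家族保守估算上下文窗口。"""
--     model_name = (model or "").strip().lower()
--     rules = [
--         (("claude-3.7", "claude-3.5", "claude-3", "claude-sonnet-4"), 200_000),
--         (("gpt-4o", "gpt-4.1", "gpt-4-turbo", "gpt-4-1106", "gpt-4-0125", "o1", "o3", "gemini-1.5", "gemini-2"), 128_000),
--         (("deepseek-chat", "deepseek-reasoner", "deepseek-r1"), 64_000),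
--         (("gpt-4-32k", "qwen-max", "qwen-plus"), 32_000),
--         (("gpt-3.5-turbo", "qwen-turbo"), 16_000),
--         (("gpt-4",), 8_192),
--     ]
--     for keywords, window in rules:
--         if any(keyword in model_name for keyword in keywords):
--             return window
--     return 8_192
-- ===== SOURCE B (Python) =====
-- def _estimate_context_window(model: str) -> int:
--     """Same estimate, computed as a max-aggregate over a flat keyword table."""
--     model_name = (model or "").strip().lower()
--     pairs = [
--         ("claude-3.7", 200_000), ("claude-3.5", 200_000), ("claude-3", 200_000), ("claude-sonnet-4", 200_000),
--         ("gpt-4o", 128_000), ("gpt-4.1", 128_000), ("gpt-4-turbo", 128_000), ("gpt-4-1106", 128_000),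
--         ("gpt-4-0125", 128_000), ("o1", 128_000), ("o3", 128_000), ("gemini-1.5", 128_000), ("gemini-2", 128_000),
--         ("deepseek-chat", 64_000), ("deepseek-reasoner", 64_000), ("deepseek-r1", 64_000),
--         ("gpt-4-32k", 32_000), ("qwen-max", 32_000), ("qwen-plus", 32_000),
--         ("gpt-3.5-turbo", 16_000), ("qwen-turbo", 16_000),
--         ("gpt-4", 8_192),
--     ]
--     matched = [w for kw, w in pairs if kw in model_name]
--     return max(matched, default=8_192)
-- ===== Notes on version B (the rewrite author's own statement) =====
-- stated objective: alternative
-- what changed: Replaces the ordered early-return scan over grouped rules by a flat (keyword, window) table: collect every window whose keyword occurs in the normalized name and return the maximum (default 8192); correct because the original rules are in strictly descending window order, so first match equals largest match.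
import Mathlib
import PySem

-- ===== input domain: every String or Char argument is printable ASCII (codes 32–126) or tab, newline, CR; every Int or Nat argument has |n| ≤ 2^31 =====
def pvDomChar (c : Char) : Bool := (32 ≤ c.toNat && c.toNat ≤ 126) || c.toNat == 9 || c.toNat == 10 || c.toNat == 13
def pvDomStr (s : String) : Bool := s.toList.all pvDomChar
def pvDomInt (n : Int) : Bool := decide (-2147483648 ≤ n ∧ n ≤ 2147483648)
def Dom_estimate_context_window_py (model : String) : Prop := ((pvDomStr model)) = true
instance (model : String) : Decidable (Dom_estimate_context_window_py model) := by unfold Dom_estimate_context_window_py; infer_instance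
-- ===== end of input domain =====

-- B replaces A's first-match scan over grouped rules by a max-aggregate over a flat keyword table (alternative decomposition, same cost).

-- ===== PORT A =====
def pvRulesA : List (List String × Int) :=
  [ (["claude-3.7", "claude-3.5", "claude-3", "claude-sonnet-4"], 200000),
    (["gpt-4o", "gpt-4.1", "gpt-4-turbo", "gpt-4-1106", "gpt-4-0125", "o1", "o3", "gemini-1.5", "gemini-2"], 128000),
    (["deepseek-chat", "deepseek-reasoner", "deepseek-r1"], 64000),
    (["gpt-4-32k", "qwen-max", "qwen-plus"], 32000),
    (["gpt-3.5-turbo", "qwen-turbo"], 16000),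
    (["gpt-4"], 8192) ]

-- the 'for keywords, window in rules: if any(...): return window' loop
def pvFirstMatch : List (List String × Int) → String → Int
  | [], _ => 8192
  | (kws, w) :: rest, name =>
      if kws.any (fun k => PySem.Str.isIn k name) then w else pvFirstMatch rest name

def estimate_context_window_py (model : String) : Int :=
  let model_name := PySem.Str.lower (PySem.Str.strip (if model == "" then "" else model))
  pvFirstMatch pvRulesA model_name

-- ===== PORT B =====
def pvPairsB : List (String × Int) :=
  [ ("claude-3.7", 200000), ("claude-3.5", 200000), ("claude-3", 200000), ("claude-sonnet-4", 200000),
    ("gpt-4o", 128000), ("gpt-4.1", 128000), ("gpt-4-turbo", 128000), ("gpt-4-1106", 128000),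
    ("gpt-4-0125", 128000), ("o1", 128000), ("o3", 128000), ("gemini-1.5", 128000), ("gemini-2", 128000),
    ("deepseek-chat", 64000), ("deepseek-reasoner", 64000), ("deepseek-r1", 64000),
    ("gpt-4-32k", 32000), ("qwen-max", 32000), ("qwen-plus", 32000),
    ("gpt-3.5-turbo", 16000), ("qwen-turbo", 16000),
    ("gpt-4", 8192) ]

def estimate_context_window_py_alt (model : String) : Int :=
  let model_name := PySem.Str.lower (PySem.Str.strip (if model == "" then "" else model))
  let matched := (pvPairsB.filter (fun p => PySem.Str.isIn p.1 model_name)).map (fun p => p.2)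
  PySem.List.maxD matched (fun x => x) 8192

-- ===== PRECONDITION & SPEC =====
def Spec_estimate_context_window_py (model : String) (out : Int) : Prop := out = estimate_context_window_py_alt model
instance (model : String) (out : Int) : Decidable (Spec_estimate_context_window_py model out) := by unfold Spec_estimate_context_window_py; infer_instance

-- ===== CLAIM (what is proved, stated in full; the proofs are below) =====
def Claim_equal_estimate_context_window_py : Prop := ∀ (model : String), Dom_estimate_context_window_py model → Spec_estimate_context_window_py model (estimate_context_window_py model)

-- ===== LEMMAS AND PROOFS =====

-- max(xs, default) of an Int list that contains w and whose elements are all ≤ w is w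
theorem pv_maxD_eq (xs : List Int) (w : Int) (hmem : w ∈ xs) (hle : ∀ y ∈ xs, y ≤ w) :
    PySem.List.maxD xs (fun x => x) 8192 = w := by
  unfold PySem.List.maxD
  cases h : PySem.List.max? xs (fun x => x) with
  | none =>
      rw [PySem.List.max?_eq_none_iff] at h
      subst h; cases hmem
  | some m =>
      have hm : m ∈ xs := PySem.List.max?_mem h
      have h1 : w ≤ m := PySem.List.max?_isMax h w hmem
      have h2 : m ≤ w := hle m hm
      simp [le_antisymm h2 h1]

-- B's flat table is exactly A's rule list flattened
theorem pv_flat_eq : pvRulesA.flatMap (fun r => r.1.map (fun k => (k, r.2))) = pvPairsB := by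
  decide

-- the core equivalence: on rules with strictly descending windows,
-- the max of all matched windows (default 8192) is the first matching window
theorem pv_main (rules : List (List String × Int)) (name : String)
    (hsort : (rules.map (fun r => r.2)).Pairwise (· > ·)) :
    PySem.List.maxD
      (((rules.flatMap (fun r => r.1.map (fun k => (k, r.2)))).filter
          (fun p => PySem.Str.isIn p.1 name)).map (fun p => p.2))
      (fun x => x) 8192 = pvFirstMatch rules name := by
  induction rules with
  | nil => rfl
  | cons hd rest ih =>
      obtain ⟨kws, w⟩ := hd
      simp only [List.map_cons, List.pairwise_cons] at hsort
      obtain ⟨hgt, hsort'⟩ := hsort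
      simp only [List.flatMap_cons, List.filter_append, List.map_append]
      have hstep : pvFirstMatch ((kws, w) :: rest) name
          = if kws.any (fun k => PySem.Str.isIn k name) then w else pvFirstMatch rest name := rfl
      by_cases hm : kws.any (fun k => PySem.Str.isIn k name) = true
      · have hFM : pvFirstMatch ((kws, w) :: rest) name = w := by
          rw [hstep, if_pos hm]
        rw [hFM]
        apply pv_maxD_eq
        · -- w is among the matched windows: some keyword of this group matches
          obtain ⟨k, hk, hkin⟩ := List.any_eq_true.mp hm
          refine List.mem_append_left _ ?_
          simp only [List.mem_map, List.mem_filter]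
          exact ⟨(k, w), ⟨⟨k, hk, rfl⟩, hkin⟩, rfl⟩
        · -- every matched window is ≤ w
          intro y hy
          rcases List.mem_append.mp hy with hyg | hyr
          · -- from this group: equal to w
            simp only [List.mem_map, List.mem_filter, List.mem_map] at hyg
            obtain ⟨p, ⟨⟨k, _, hpk⟩, _⟩, hpy⟩ := hyg
            subst hpk; subst hpy; exact le_refl w
          · -- from the rest: a window of a later rule, < w by descending order
            simp only [List.mem_map, List.mem_filter, List.mem_flatMap] at hyr
            obtain ⟨p, ⟨⟨r, hr, ⟨k, _, hpk⟩⟩, _⟩, hpy⟩ := hyr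
            subst hpk; subst hpy
            have : w > r.2 := hgt r.2 (List.mem_map.mpr ⟨r, hr, rfl⟩)
            omega
      · -- no keyword of this group matches: the group contributes nothing
        have hnil : (kws.map (fun k => (k, w))).filter (fun p => PySem.Str.isIn p.1 name) = [] := by
          apply List.filter_eq_nil_iff.mpr
          intro p hp
          simp only [List.mem_map] at hp
          obtain ⟨k, hk, hpk⟩ := hp
          subst hpk
          simp only [List.any_eq_true, not_exists, not_and] at hm
          simpa using hm k hk
        rw [hnil]
        simp only [List.map_nil, List.nil_append]
        have hFM : pvFirstMatch ((kws, w) :: rest) name = pvFirstMatch rest name := by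
          rw [hstep, if_neg hm]
        rw [hFM]
        exact ih hsort'

-- ===== VERDICT (by name: the statement is the Claim_ definition above) =====
theorem estimate_context_window_py_spec : Claim_equal_estimate_context_window_py := by
  intro model _
  unfold Spec_estimate_context_window_py estimate_context_window_py estimate_context_window_py_alt
  rw [← pv_flat_eq]
  exact (pv_main pvRulesA _ (by decide)).symm
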